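-- pv_equiv track=rewrite | github.com/mateozorzi/TDA | Resueltos/2024-C0-1/laberinto.py | buscarOptimos
-- ===== SOURCE A (Python) =====
-- def buscarOptimos(matriz,V):
--     optimos = [[0] * (len(matriz[0])+1) for _ in range(len(matriz)+1)]
--
--     #caso base: la casilla (0,0) tengo la vida al maximo
--
--     for i in range(1,len(optimos)):
--         for j in range(1,len(optimos[0])):
--             if i == 1 and j == 1:
--                 optimos[1][1] = V
--             elif i == 1:
--                 #solo puedo ir para la izq
--                 optimos[i][j] = optimos[i][j-1] - matriz[i-1][j-1]
--             elif j == 1: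
--                 #solo puedo volver para arriba
--                 optimos[i][j] = optimos[i-1][j] - matriz[i-1][j-1]
--             #ec de recurrencia, me fijo por donde me conviene venir, el optimo es el lugar donde mas vida tenga restante
--             #y le resto la trampa que tenga la casilla [i][j]
--             else:
--                 optimos[i][j] = max(optimos[i][j-1], optimos[i-1][j]) - matriz[i-1][j-1]
--
--     return optimos
-- ===== SOURCE B (Python) =====
-- def buscarOptimos(matriz, V):
--     memo = {}
--
--     def vida(i, j):
--         # remaining life on arrival at padded cell (i, j); borders are 0
--         if i == 0 or j == 0:
--             return 0
--         if (i, j) in memo: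
--             return memo[(i, j)]
--         if i == 1 and j == 1:
--             r = V
--         elif i == 1:
--             r = vida(1, j - 1) - matriz[0][j - 1]
--         elif j == 1:
--             r = vida(i - 1, 1) - matriz[i - 1][0]
--         else:
--             r = max(vida(i, j - 1), vida(i - 1, j)) - matriz[i - 1][j - 1]
--         memo[(i, j)] = r
--         return r
--
--     return [[vida(i, j) for j in range(len(matriz[0]) + 1)]
--             for i in range(len(matriz) + 1)]
-- ===== Notes on version B (the rewrite author's own statement) =====
-- stated objective: alternative
-- what changed: Replaces the bottom-up in-place 2D-table fill with a top-down memoized recursion over cells (a dict-cached helper vida(i,j)), from which the padded result table is built by comprehension.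
import Mathlib
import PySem

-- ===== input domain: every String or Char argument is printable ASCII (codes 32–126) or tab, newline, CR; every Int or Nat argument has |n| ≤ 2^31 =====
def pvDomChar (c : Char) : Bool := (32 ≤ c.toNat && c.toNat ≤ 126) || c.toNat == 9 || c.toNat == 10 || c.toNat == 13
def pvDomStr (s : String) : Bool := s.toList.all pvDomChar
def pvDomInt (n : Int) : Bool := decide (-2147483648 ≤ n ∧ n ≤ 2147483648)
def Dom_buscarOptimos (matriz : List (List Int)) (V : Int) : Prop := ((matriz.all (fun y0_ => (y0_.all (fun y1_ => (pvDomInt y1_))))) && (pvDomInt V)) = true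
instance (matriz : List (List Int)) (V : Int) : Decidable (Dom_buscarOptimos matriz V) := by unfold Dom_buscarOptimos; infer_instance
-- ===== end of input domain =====

-- B replaces A's bottom-up in-place 2D-table fill with a top-down memoized recursion over
-- cells, building the padded table from the memoized helper (alternative decomposition,
-- same asymptotic cost).

-- ===== PORT A =====
-- A-side helpers: optimos[i][j] reads/writes; in-range on Pre_, so the total getD/setD forms are exact
def pvGet2 (t : List (List Int)) (i j : Int) : Int :=
  PySem.List.pyGetD (PySem.List.pyGetD t i []) j 0

def pvSet2 (t : List (List Int)) (i j : Int) (v : Int) : List (List Int) :=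
  PySem.List.pySetD t i (PySem.List.pySetD (PySem.List.pyGetD t i []) j v)

def buscarOptimos (matriz : List (List Int)) (V : Int) : List (List Int) :=
  -- optimos = [[0] * (len(matriz[0])+1) for _ in range(len(matriz)+1)]
  let optimos : List (List Int) :=
    List.replicate (matriz.length + 1)
      (List.replicate ((PySem.List.pyGetD matriz 0 []).length + 1) (0 : Int))
  -- for i in range(1, len(optimos)): for j in range(1, len(optimos[0])): …
  (PySem.List.pyRange 1 (optimos.length : Int) 1).foldl (fun opt i =>
    (PySem.List.pyRange 1 (PySem.List.len (PySem.List.pyGetD opt 0 [])) 1).foldl (fun opt j =>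
      if i = 1 ∧ j = 1 then
        pvSet2 opt 1 1 V
      else if i = 1 then
        pvSet2 opt i j (pvGet2 opt i (j - 1) - pvGet2 matriz (i - 1) (j - 1))
      else if j = 1 then
        pvSet2 opt i j (pvGet2 opt (i - 1) j - pvGet2 matriz (i - 1) (j - 1))
      else
        pvSet2 opt i j (max (pvGet2 opt i (j - 1)) (pvGet2 opt (i - 1) j) -
          pvGet2 matriz (i - 1) (j - 1))) opt) optimos

-- ===== PORT B =====
-- B-side helper: matriz[i][j] (Nat indices; in-range on Pre_, default 0 is never used there)
def pvM (t : List (List Int)) (i j : Nat) : Int := (t.getD i []).getD j 0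

-- vida(i, j) with the memo dict threaded through (Python's closure mutates `memo`)
def pvVida (matriz : List (List Int)) (V : Int) :
    Nat → Nat → PySem.Dict (Nat × Nat) Int → Int × PySem.Dict (Nat × Nat) Int
  | i, j, memo =>
    if i = 0 ∨ j = 0 then (0, memo)
    else
      match memo.get? (i, j) with
      | some v => (v, memo)
      | none =>
        let rm :=
          if _h1 : i = 1 ∧ j = 1 then (V, memo)
          else if _h2 : i = 1 then
            let p := pvVida matriz V 1 (j - 1) memo
            (p.1 - pvM matriz 0 (j - 1), p.2)
          else if _h3 : j = 1 then
            let p := pvVida matriz V (i - 1) 1 memo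
            (p.1 - pvM matriz (i - 1) 0, p.2)
          else
            let p := pvVida matriz V i (j - 1) memo
            let q := pvVida matriz V (i - 1) j p.2
            (max p.1 q.1 - pvM matriz (i - 1) (j - 1), q.2)
        (rm.1, rm.2.insert (i, j) rm.1)
  termination_by i j _ => i + j
  decreasing_by all_goals omega

def buscarOptimos_alt (matriz : List (List Int)) (V : Int) : List (List Int) :=
  let n := matriz.length
  let m := (matriz.headD []).length   -- len(matriz[0]); total form, Pre_ gives matriz ≠ []
  -- [[vida(i, j) for j in range(m+1)] for i in range(n+1)], threading the memo
  ((List.range (n + 1)).foldl (fun (st : List (List Int) × PySem.Dict (Nat × Nat) Int) i =>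
      let row := (List.range (m + 1)).foldl
        (fun (r : List Int × PySem.Dict (Nat × Nat) Int) j =>
          let p := pvVida matriz V i j r.2
          (r.1 ++ [p.1], p.2)) ([], st.2)
      (st.1 ++ [row.1], row.2)) ([], PySem.Dict.empty)).1

-- ===== PRECONDITION & SPEC =====
-- Pre_ excludes exactly the inputs on which the Python A raises IndexError: empty matriz
-- (matriz[0]) or a row shorter than the first row (matriz[i-1][j-1]).
def Pre_buscarOptimos (matriz : List (List Int)) (V : Int) : Prop :=
  matriz ≠ [] ∧ ∀ row ∈ matriz, (matriz.headD []).length ≤ row.length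

instance (matriz : List (List Int)) (V : Int) : Decidable (Pre_buscarOptimos matriz V) := by
  unfold Pre_buscarOptimos; infer_instance

def pvWitness_buscarOptimos : List (List Int) × Int := ([[1, 2], [3, 0]], 10)

def Spec_buscarOptimos (matriz : List (List Int)) (V : Int) (out : List (List Int)) : Prop := out = buscarOptimos_alt matriz V
instance (matriz : List (List Int)) (V : Int) (out : List (List Int)) : Decidable (Spec_buscarOptimos matriz V out) := by unfold Spec_buscarOptimos; infer_instance

-- ===== CLAIM (what is proved, stated in full; the proofs are below) =====
def Claim_equal_buscarOptimos : Prop := ∀ (matriz : List (List Int)) (V : Int), Dom_buscarOptimos matriz V → Pre_buscarOptimos matriz V → Spec_buscarOptimos matriz V (buscarOptimos matriz V)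

-- ===== LEMMAS AND PROOFS =====

-- The common specification: remaining life at padded cell (i, j), by well-founded recursion.
def pvF (matriz : List (List Int)) (V : Int) : Nat → Nat → Int
  | i, j =>
    if i = 0 ∨ j = 0 then 0
    else if i = 1 ∧ j = 1 then V
    else if _h2 : i = 1 then pvF matriz V 1 (j - 1) - pvM matriz 0 (j - 1)
    else if _h3 : j = 1 then pvF matriz V (i - 1) 1 - pvM matriz (i - 1) 0
    else max (pvF matriz V i (j - 1)) (pvF matriz V (i - 1) j) - pvM matriz (i - 1) (j - 1)
  termination_by i j => i + j
  decreasing_by all_goals omega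

lemma pvF_zero (matriz V) {i j : Nat} (h : i = 0 ∨ j = 0) : pvF matriz V i j = 0 := by
  rw [pvF]; simp [h]

lemma pvF_one_one (matriz V) : pvF matriz V 1 1 = V := by
  rw [pvF]; simp

lemma pvF_row (matriz V) {j : Nat} (h : 2 ≤ j) :
    pvF matriz V 1 j = pvF matriz V 1 (j - 1) - pvM matriz 0 (j - 1) := by
  rw [pvF]; rw [if_neg (by omega), if_neg (by omega), dif_pos rfl]

lemma pvF_col (matriz V) {i : Nat} (h : 2 ≤ i) :
    pvF matriz V i 1 = pvF matriz V (i - 1) 1 - pvM matriz (i - 1) 0 := by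
  rw [pvF]; rw [if_neg (by omega), if_neg (by omega), dif_neg (by omega), dif_pos rfl]

lemma pvF_mid (matriz V) {i j : Nat} (hi : 2 ≤ i) (hj : 2 ≤ j) :
    pvF matriz V i j =
      max (pvF matriz V i (j - 1)) (pvF matriz V (i - 1) j) - pvM matriz (i - 1) (j - 1) := by
  rw [pvF]; rw [if_neg (by omega), if_neg (by omega), dif_neg (by omega), dif_neg (by omega)]

-- ----- B side: the memo is always correct, and vida computes pvF -----
def pvMemoOK (matriz : List (List Int)) (V : Int) (memo : PySem.Dict (Nat × Nat) Int) : Prop :=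
  ∀ p v, memo.get? p = some v → v = pvF matriz V p.1 p.2

lemma pvMemoOK_insert {matriz V memo} (hm : pvMemoOK matriz V memo) {i j : Nat} {v : Int}
    (hv : v = pvF matriz V i j) : pvMemoOK matriz V (memo.insert (i, j) v) := by
  intro p w hw
  rw [PySem.Dict.get?_insert] at hw
  split at hw
  · rename_i hp; cases hw; subst hp; exact hv
  · exact hm p w hw

lemma pvVida_correct_aux (matriz V) : ∀ (N i j : Nat) (memo), i + j ≤ N →
    pvMemoOK matriz V memo →
    (pvVida matriz V i j memo).1 = pvF matriz V i j ∧
      pvMemoOK matriz V (pvVida matriz V i j memo).2 := by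
  intro N
  induction N with
  | zero =>
    intro i j memo h hm
    have hi : i = 0 := by omega
    rw [pvVida]
    simp only [hi]
    exact ⟨(pvF_zero matriz V (Or.inl rfl)).symm, hm⟩
  | succ N ih =>
    intro i j memo h hm
    rw [pvVida]
    by_cases h0 : i = 0 ∨ j = 0
    · simp [h0, pvF_zero matriz V h0, hm]
    · simp only [if_neg h0]
      simp only [not_or] at h0
      cases hget : memo.get? (i, j) with
      | some v =>
        simpa using ⟨hm _ _ hget, hm⟩
      | none =>
        simp only []
        by_cases h1 : i = 1 ∧ j = 1
        · rw [dif_pos h1]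
          have hv : V = pvF matriz V i j := by rw [h1.1, h1.2, pvF_one_one]
          exact ⟨hv, pvMemoOK_insert hm hv⟩
        · by_cases h2 : i = 1
          · have hj2 : 2 ≤ j := by omega
            obtain ⟨hp1, hp2⟩ := ih 1 (j - 1) memo (by omega) hm
            rw [dif_neg h1, dif_pos h2]
            have hv : (pvVida matriz V 1 (j - 1) memo).1 - pvM matriz 0 (j - 1) =
                pvF matriz V i j := by
              rw [hp1, h2, pvF_row matriz V hj2]
            exact ⟨hv, pvMemoOK_insert hp2 hv⟩
          · by_cases h3 : j = 1
            · have hi2 : 2 ≤ i := by omega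
              obtain ⟨hp1, hp2⟩ := ih (i - 1) 1 memo (by omega) hm
              rw [dif_neg h1, dif_neg h2, dif_pos h3]
              have hv : (pvVida matriz V (i - 1) 1 memo).1 - pvM matriz (i - 1) 0 =
                  pvF matriz V i j := by
                rw [hp1, h3, pvF_col matriz V hi2]
              exact ⟨hv, pvMemoOK_insert hp2 hv⟩
            · have hi2 : 2 ≤ i := by omega
              have hj2 : 2 ≤ j := by omega
              obtain ⟨hp1, hp2⟩ := ih i (j - 1) memo (by omega) hm
              obtain ⟨hq1, hq2⟩ :=
                ih (i - 1) j (pvVida matriz V i (j - 1) memo).2 (by omega) hp2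
              rw [dif_neg h1, dif_neg h2, dif_neg h3]
              have hv : max (pvVida matriz V i (j - 1) memo).1
                    (pvVida matriz V (i - 1) j (pvVida matriz V i (j - 1) memo).2).1 -
                    pvM matriz (i - 1) (j - 1) = pvF matriz V i j := by
                rw [hp1, hq1, pvF_mid matriz V hi2 hj2]
              exact ⟨hv, pvMemoOK_insert hq2 hv⟩

lemma pvVida_correct (matriz V) (i j : Nat) (memo) (hm : pvMemoOK matriz V memo) :
    (pvVida matriz V i j memo).1 = pvF matriz V i j ∧
      pvMemoOK matriz V (pvVida matriz V i j memo).2 :=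
  pvVida_correct_aux matriz V (i + j) i j memo le_rfl hm

-- ----- B's table builder returns the table of pvF -----
lemma pvRowFold (matriz V) (i : Nat) : ∀ (js : List Nat) (acc : List Int) (memo),
    pvMemoOK matriz V memo →
    (js.foldl (fun (r : List Int × PySem.Dict (Nat × Nat) Int) j =>
        let p := pvVida matriz V i j r.2
        (r.1 ++ [p.1], p.2)) (acc, memo)).1 = acc ++ js.map (fun j => pvF matriz V i j) ∧
    pvMemoOK matriz V ((js.foldl (fun (r : List Int × PySem.Dict (Nat × Nat) Int) j =>
        let p := pvVida matriz V i j r.2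
        (r.1 ++ [p.1], p.2)) (acc, memo)).2) := by
  intro js
  induction js with
  | nil => intro acc memo hm; simpa using hm
  | cons j js ih =>
    intro acc memo hm
    obtain ⟨h1, h2⟩ := pvVida_correct matriz V i j memo hm
    obtain ⟨r1, r2⟩ := ih (acc ++ [(pvVida matriz V i j memo).1]) (pvVida matriz V i j memo).2 h2
    simp only [List.foldl_cons, List.map_cons]
    exact ⟨by rw [r1, h1]; simp, r2⟩

lemma pvTblFold (matriz V) (m : Nat) : ∀ (is_ : List Nat) (acc : List (List Int)) (memo),
    pvMemoOK matriz V memo →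
    (is_.foldl (fun (st : List (List Int) × PySem.Dict (Nat × Nat) Int) i =>
        let row := (List.range (m + 1)).foldl
          (fun (r : List Int × PySem.Dict (Nat × Nat) Int) j =>
            let p := pvVida matriz V i j r.2
            (r.1 ++ [p.1], p.2)) ([], st.2)
        (st.1 ++ [row.1], row.2)) (acc, memo)).1
      = acc ++ is_.map (fun i => (List.range (m + 1)).map (fun j => pvF matriz V i j)) := by
  intro is_
  induction is_ with
  | nil => intro acc memo _; simp
  | cons i is_ ih =>
    intro acc memo hm
    obtain ⟨r1, r2⟩ := pvRowFold matriz V i (List.range (m + 1)) [] memo hm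
    simp only [List.foldl_cons]
    rw [ih _ _ r2]
    simp [r1]

lemma pvMemoOK_empty (matriz V) : pvMemoOK matriz V PySem.Dict.empty := by
  intro p v h
  rw [PySem.Dict.get?_empty] at h
  cases h

lemma pvAlt_eq (matriz V) :
    buscarOptimos_alt matriz V =
      (List.range (matriz.length + 1)).map (fun i =>
        (List.range ((matriz.headD []).length + 1)).map (fun j => pvF matriz V i j)) := by
  have h := pvTblFold matriz V (matriz.headD []).length (List.range (matriz.length + 1))
    [] PySem.Dict.empty (pvMemoOK_empty matriz V)
  simpa [buscarOptimos_alt] using h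

-- ----- A side -----
-- Row i of the table, filled up to column j (columns > j still hold the initial 0).
def pvRow (matriz : List (List Int)) (V : Int) (m i j : Nat) : List Int :=
  (List.range (m + 1)).map (fun c => if c ≤ j then pvF matriz V i c else 0)

-- Table state: rows < i fully filled, row i filled to column j, rows > i untouched.
def pvT (matriz : List (List Int)) (V : Int) (n m i j : Nat) : List (List Int) :=
  (List.range i).map (fun a => pvRow matriz V m a m) ++
    [pvRow matriz V m i j] ++ List.replicate (n - i) (List.replicate (m + 1) (0 : Int))

lemma pvRow_zero (matriz : List (List Int)) (V : Int) (m : Nat) {i j : Nat}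
    (h : i = 0 ∨ j = 0) : pvRow matriz V m i j = List.replicate (m + 1) (0 : Int) := by
  unfold pvRow
  apply List.ext_getElem
  · simp
  · intro c hc1 hc2
    simp only [List.getElem_map, List.getElem_range, List.getElem_replicate]
    rcases h with h | h <;> subst h
    · split <;> simp [pvF_zero matriz V (Or.inl rfl)]
    · split
      · rename_i hcle
        have hc0 : c = 0 := by omega
        subst hc0
        exact pvF_zero matriz V (Or.inr rfl)
      · rfl

lemma pvRow_full (matriz V) (m i : Nat) :
    pvRow matriz V m i m = (List.range (m + 1)).map (fun c => pvF matriz V i c) := by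
  unfold pvRow
  refine List.map_congr_left (fun c hc => ?_)
  rw [List.mem_range] at hc
  rw [if_pos (by omega)]

lemma pvGetD_map_range (f : Nat → Int) (m b : Nat) (d : Int) :
    ((List.range m).map f).getD b d = if b < m then f b else d := by
  rw [List.getD_eq_getElem?_getD, List.getElem?_map]
  by_cases h : b < m
  · simp [h]
  · simp [h, List.getElem?_eq_none (by simpa using h : (List.range m).length ≤ b)]

lemma pvGetD_replicate (k b : Nat) : (List.replicate k (0 : Int)).getD b 0 = 0 := by
  rw [List.getD_eq_getElem?_getD]
  by_cases h : b < k <;> simp [List.getElem?_replicate, h]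

lemma getD_pvRow (matriz V) (m i j b : Nat) :
    (pvRow matriz V m i j).getD b 0 =
      if b ≤ m then (if b ≤ j then pvF matriz V i b else 0) else 0 := by
  unfold pvRow
  rw [pvGetD_map_range]
  by_cases hb : b ≤ m
  · rw [if_pos (by omega), if_pos hb]
  · rw [if_neg (by omega), if_neg hb]

lemma row_pvT (matriz V) (n m i j a : Nat) (hin : i ≤ n) :
    (pvT matriz V n m i j).getD a [] =
      if a < i then pvRow matriz V m a m
      else if a = i then pvRow matriz V m i j
      else if a ≤ n then List.replicate (m + 1) (0 : Int)
      else [] := by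
  unfold pvT
  rw [List.append_assoc, List.singleton_append]
  by_cases h1 : a < i
  · rw [if_pos h1, List.getD_eq_getElem?_getD, List.getElem?_append_left (by simpa using h1)]
    simp [h1]
  · by_cases h2 : a = i
    · subst h2
      rw [if_neg h1, if_pos rfl, List.getD_eq_getElem?_getD,
        List.getElem?_append_right (by simp)]
      simp
    · rw [if_neg h1, if_neg h2, List.getD_eq_getElem?_getD,
        List.getElem?_append_right (by simp; omega)]
      have hk : ((List.range i).map fun a => pvRow matriz V m a m).length = i := by simp
      rw [hk, List.getElem?_cons]
      rw [if_neg (show ¬ a - i = 0 by omega)]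
      by_cases h3 : a ≤ n
      · rw [if_pos h3]
        simp [List.getElem?_replicate, show a - i - 1 < n - i by omega]
      · rw [if_neg h3]
        simp [List.getElem?_replicate, show ¬ (a - i - 1 < n - i) by omega]

lemma get2_pvT (matriz V) (n m i j a b : Nat) (hin : i ≤ n) (hb : b ≤ m) :
    pvGet2 (pvT matriz V n m i j) (a : Int) (b : Int) =
      if a < i then pvF matriz V a b
      else if a = i then (if b ≤ j then pvF matriz V i b else 0)
      else 0 := by
  unfold pvGet2
  rw [PySem.List.pyGetD_natCast, PySem.List.pyGetD_natCast, row_pvT matriz V n m i j a hin]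
  by_cases h1 : a < i
  · rw [if_pos h1, if_pos h1, getD_pvRow, if_pos hb, if_pos hb]
  · by_cases h2 : a = i
    · rw [if_neg h1, if_pos h2, if_neg h1, if_pos h2, getD_pvRow, if_pos hb]
    · rw [if_neg h1, if_neg h2, if_neg h1, if_neg h2]
      by_cases h3 : a ≤ n
      · rw [if_pos h3, pvGetD_replicate]
      · rw [if_neg h3]; rfl

lemma get2_matriz (t : List (List Int)) (i j : Nat) (hi : 1 ≤ i) (hj : 1 ≤ j) :
    pvGet2 t ((i : Int) - 1) ((j : Int) - 1) = pvM t (i - 1) (j - 1) := by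
  have h1 : (i : Int) - 1 = ((i - 1 : Nat) : Int) := by omega
  have h2 : (j : Int) - 1 = ((j - 1 : Nat) : Int) := by omega
  rw [pvGet2, pvM, h1, h2, PySem.List.pyGetD_natCast, PySem.List.pyGetD_natCast]

lemma set_pvRow (matriz V) (m i j : Nat) (hj1 : 1 ≤ j) :
    (pvRow matriz V m i (j - 1)).set j (pvF matriz V i j) = pvRow matriz V m i j := by
  unfold pvRow
  apply List.ext_getElem
  · simp
  · intro c hc1 hc2
    rw [List.getElem_set]
    simp only [List.getElem_map, List.getElem_range]
    by_cases h : j = c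
    · subst h
      rw [if_pos rfl, if_pos (le_refl j)]
    · rw [if_neg h]
      by_cases hc : c ≤ j - 1
      · rw [if_pos hc, if_pos (by omega)]
      · rw [if_neg hc, if_neg (by omega)]

lemma pv_set_append {α : Type} (L1 : List α) (r v : α) (Z : List α) (k : Nat)
    (hk : k = L1.length) : (L1 ++ r :: Z).set k v = L1 ++ v :: Z := by
  subst hk
  rw [List.set_append]
  simp

lemma set2_pvT (matriz V) (n m i j : Nat) (hi1 : 1 ≤ i) (hin : i ≤ n) (hj1 : 1 ≤ j)
    (hjm : j ≤ m) :
    pvSet2 (pvT matriz V n m i (j - 1)) (i : Int) (j : Int) (pvF matriz V i j) =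
      pvT matriz V n m i j := by
  unfold pvSet2
  rw [PySem.List.pyGetD_natCast, PySem.List.pySetD_natCast, PySem.List.pySetD_natCast,
    row_pvT matriz V n m i (j - 1) i hin, if_neg (lt_irrefl i), if_pos rfl,
    set_pvRow matriz V m i j hj1]
  unfold pvT
  rw [List.append_assoc, List.singleton_append, List.append_assoc, List.singleton_append,
    pv_set_append _ _ _ _ i (by simp)]

lemma pvT_zero_m (matriz V) (n m : Nat) :
    pvT matriz V n m 0 m = List.replicate (n + 1) (List.replicate (m + 1) (0 : Int)) := by
  unfold pvT
  rw [pvRow_zero matriz V m (Or.inl rfl)]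
  simp [List.replicate_succ]

lemma pvT_shift (matriz V) (n m i : Nat) (hi1 : 1 ≤ i) (hin : i ≤ n) :
    pvT matriz V n m (i - 1) m = pvT matriz V n m i 0 := by
  unfold pvT
  rw [pvRow_zero matriz V m (Or.inr rfl),
    show List.range i = List.range (i - 1) ++ [i - 1] by
      rw [← List.range_succ]; congr 1; omega,
    show n - (i - 1) = (n - i) + 1 by omega, List.replicate_succ]
  simp [List.append_assoc]

lemma pvT_final (matriz V) (n m : Nat) :
    pvT matriz V n m n m = (List.range (n + 1)).map (fun a => pvRow matriz V m a m) := by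
  unfold pvT
  rw [List.range_succ]
  simp

lemma len_row0 (matriz V) (n m i j : Nat) (hin : i ≤ n) :
    PySem.List.len (PySem.List.pyGetD (pvT matriz V n m i j) 0 []) = (m : Int) + 1 := by
  rw [PySem.List.pyGetD_zero, row_pvT matriz V n m i j 0 hin]
  by_cases h : 0 < i
  · rw [if_pos h, PySem.List.len_eq]
    unfold pvRow
    push_cast [List.length_map, List.length_range]
    ring
  · have h0 : i = 0 := by omega
    rw [if_neg h, if_pos h0.symm, PySem.List.len_eq]
    unfold pvRow
    push_cast [List.length_map, List.length_range]
    ring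

lemma istep_pvT (matriz V) (n m i j : Nat) (hi1 : 1 ≤ i) (hin : i ≤ n) (hj1 : 1 ≤ j)
    (hjm : j ≤ m) :
    (if (i : Int) = 1 ∧ (j : Int) = 1 then pvSet2 (pvT matriz V n m i (j - 1)) 1 1 V
     else if (i : Int) = 1 then
       pvSet2 (pvT matriz V n m i (j - 1)) (i : Int) (j : Int)
         (pvGet2 (pvT matriz V n m i (j - 1)) (i : Int) ((j : Int) - 1) -
           pvGet2 matriz ((i : Int) - 1) ((j : Int) - 1))
     else if (j : Int) = 1 then
       pvSet2 (pvT matriz V n m i (j - 1)) (i : Int) (j : Int)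
         (pvGet2 (pvT matriz V n m i (j - 1)) ((i : Int) - 1) (j : Int) -
           pvGet2 matriz ((i : Int) - 1) ((j : Int) - 1))
     else
       pvSet2 (pvT matriz V n m i (j - 1)) (i : Int) (j : Int)
         (max (pvGet2 (pvT matriz V n m i (j - 1)) (i : Int) ((j : Int) - 1))
             (pvGet2 (pvT matriz V n m i (j - 1)) ((i : Int) - 1) (j : Int)) -
           pvGet2 matriz ((i : Int) - 1) ((j : Int) - 1))) = pvT matriz V n m i j := by
  have hcast1 : (j : Int) - 1 = ((j - 1 : Nat) : Int) := by omega
  have hcast2 : (i : Int) - 1 = ((i - 1 : Nat) : Int) := by omega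
  by_cases h1 : i = 1 ∧ j = 1
  · obtain ⟨hia, hja⟩ := h1
    subst hia; subst hja
    rw [if_pos (by omega)]
    have h := set2_pvT matriz V n m 1 1 le_rfl hin le_rfl hjm
    rw [pvF_one_one] at h
    simpa using h
  · by_cases h2 : i = 1
    · subst h2
      have hj2 : 2 ≤ j := by omega
      rw [if_neg (by omega), if_pos (by omega)]
      rw [get2_matriz matriz 1 j le_rfl hj1, hcast1,
        get2_pvT matriz V n m 1 (j - 1) 1 (j - 1) hin (by omega),
        if_neg (lt_irrefl 1), if_pos rfl, if_pos (le_refl (j - 1))]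
      rw [show pvF matriz V 1 (j - 1) - pvM matriz (1 - 1) (j - 1) = pvF matriz V 1 j by
        rw [pvF_row matriz V hj2]]
      exact set2_pvT matriz V n m 1 j le_rfl hin hj1 hjm
    · by_cases h3 : j = 1
      · subst h3
        have hi2 : 2 ≤ i := by omega
        rw [if_neg (by omega), if_neg (by omega), if_pos (by omega)]
        rw [get2_matriz matriz i 1 hi1 le_rfl, hcast2,
          get2_pvT matriz V n m i (1 - 1) (i - 1) 1 hin hjm, if_pos (by omega)]
        rw [show pvF matriz V (i - 1) 1 - pvM matriz (i - 1) (1 - 1) = pvF matriz V i 1 by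
          rw [pvF_col matriz V hi2]]
        exact set2_pvT matriz V n m i 1 hi1 hin le_rfl hjm
      · have hi2 : 2 ≤ i := by omega
        have hj2 : 2 ≤ j := by omega
        rw [if_neg (by omega), if_neg (by omega), if_neg (by omega)]
        rw [get2_matriz matriz i j hi1 hj1, hcast1, hcast2,
          get2_pvT matriz V n m i (j - 1) i (j - 1) hin (by omega),
          if_neg (lt_irrefl i), if_pos rfl, if_pos (le_refl (j - 1)),
          get2_pvT matriz V n m i (j - 1) (i - 1) j hin hjm, if_pos (by omega)]
        rw [show max (pvF matriz V i (j - 1)) (pvF matriz V (i - 1) j) -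
            pvM matriz (i - 1) (j - 1) = pvF matriz V i j by
          rw [pvF_mid matriz V hi2 hj2]]
        exact set2_pvT matriz V n m i j hi1 hin hj1 hjm

lemma inner_fold (matriz V) (n m i : Nat) (hi1 : 1 ≤ i) (hin : i ≤ n) :
    ∀ (j : Nat), 1 ≤ j → j ≤ m + 1 →
    (PySem.List.pyRange (j : Int) ((m : Int) + 1) 1).foldl
      (fun opt jj =>
        if (i : Int) = 1 ∧ jj = 1 then pvSet2 opt 1 1 V
        else if (i : Int) = 1 then
          pvSet2 opt (i : Int) jj
            (pvGet2 opt (i : Int) (jj - 1) - pvGet2 matriz ((i : Int) - 1) (jj - 1))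
        else if jj = 1 then
          pvSet2 opt (i : Int) jj
            (pvGet2 opt ((i : Int) - 1) jj - pvGet2 matriz ((i : Int) - 1) (jj - 1))
        else
          pvSet2 opt (i : Int) jj
            (max (pvGet2 opt (i : Int) (jj - 1)) (pvGet2 opt ((i : Int) - 1) jj) -
              pvGet2 matriz ((i : Int) - 1) (jj - 1)))
      (pvT matriz V n m i (j - 1)) = pvT matriz V n m i m := by
  have H : ∀ (k j : Nat), 1 ≤ j → j ≤ m + 1 → m + 1 - j = k →
      (PySem.List.pyRange (j : Int) ((m : Int) + 1) 1).foldl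
        (fun opt jj =>
          if (i : Int) = 1 ∧ jj = 1 then pvSet2 opt 1 1 V
          else if (i : Int) = 1 then
            pvSet2 opt (i : Int) jj
              (pvGet2 opt (i : Int) (jj - 1) - pvGet2 matriz ((i : Int) - 1) (jj - 1))
          else if jj = 1 then
            pvSet2 opt (i : Int) jj
              (pvGet2 opt ((i : Int) - 1) jj - pvGet2 matriz ((i : Int) - 1) (jj - 1))
          else
            pvSet2 opt (i : Int) jj
              (max (pvGet2 opt (i : Int) (jj - 1)) (pvGet2 opt ((i : Int) - 1) jj) -
                pvGet2 matriz ((i : Int) - 1) (jj - 1)))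
        (pvT matriz V n m i (j - 1)) = pvT matriz V n m i m := by
    intro k
    induction k with
    | zero =>
      intro j hj1 hjm hk
      have hj : j = m + 1 := by omega
      subst hj
      rw [PySem.List.pyRange_one_eq_nil (by push_cast; omega), List.foldl_nil]
      congr 1
    | succ k ih =>
      intro j hj1 hjm hk
      have hjle : j ≤ m := by omega
      rw [PySem.List.pyRange_one_cons (by push_cast; omega), List.foldl_cons]
      have hstep := istep_pvT matriz V n m i j hi1 hin hj1 hjle
      rw [hstep]
      have hc : (j : Int) + 1 = ((j + 1 : Nat) : Int) := by push_cast; ring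
      rw [hc]
      have := ih (j + 1) (by omega) (by omega) (by omega)
      simpa using this
  exact fun j hj1 hjm => H (m + 1 - j) j hj1 hjm rfl

lemma outer_fold (matriz V) (n m : Nat) :
    ∀ (i : Nat), 1 ≤ i → i ≤ n + 1 →
    (PySem.List.pyRange (i : Int) ((n : Int) + 1) 1).foldl
      (fun opt ii =>
        (PySem.List.pyRange 1 (PySem.List.len (PySem.List.pyGetD opt 0 [])) 1).foldl
          (fun opt jj =>
            if ii = 1 ∧ jj = 1 then pvSet2 opt 1 1 V
            else if ii = 1 then
              pvSet2 opt ii jj (pvGet2 opt ii (jj - 1) - pvGet2 matriz (ii - 1) (jj - 1))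
            else if jj = 1 then
              pvSet2 opt ii jj (pvGet2 opt (ii - 1) jj - pvGet2 matriz (ii - 1) (jj - 1))
            else
              pvSet2 opt ii jj
                (max (pvGet2 opt ii (jj - 1)) (pvGet2 opt (ii - 1) jj) -
                  pvGet2 matriz (ii - 1) (jj - 1))) opt)
      (pvT matriz V n m (i - 1) m) = pvT matriz V n m n m := by
  have H : ∀ (k i : Nat), 1 ≤ i → i ≤ n + 1 → n + 1 - i = k →
      (PySem.List.pyRange (i : Int) ((n : Int) + 1) 1).foldl
        (fun opt ii =>
          (PySem.List.pyRange 1 (PySem.List.len (PySem.List.pyGetD opt 0 [])) 1).foldl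
            (fun opt jj =>
              if ii = 1 ∧ jj = 1 then pvSet2 opt 1 1 V
              else if ii = 1 then
                pvSet2 opt ii jj (pvGet2 opt ii (jj - 1) - pvGet2 matriz (ii - 1) (jj - 1))
              else if jj = 1 then
                pvSet2 opt ii jj (pvGet2 opt (ii - 1) jj - pvGet2 matriz (ii - 1) (jj - 1))
              else
                pvSet2 opt ii jj
                  (max (pvGet2 opt ii (jj - 1)) (pvGet2 opt (ii - 1) jj) -
                    pvGet2 matriz (ii - 1) (jj - 1))) opt)
        (pvT matriz V n m (i - 1) m) = pvT matriz V n m n m := by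
    intro k
    induction k with
    | zero =>
      intro i hi1 hin hk
      have hi : i = n + 1 := by omega
      subst hi
      rw [PySem.List.pyRange_one_eq_nil (by push_cast; omega), List.foldl_nil]
      congr 1
    | succ k ih =>
      intro i hi1 hin hk
      have hile : i ≤ n := by omega
      rw [PySem.List.pyRange_one_cons (by push_cast; omega), List.foldl_cons]
      rw [len_row0 matriz V n m (i - 1) m (by omega),
        pvT_shift matriz V n m i hi1 hile]
      have hinner := inner_fold matriz V n m i hi1 hile 1 le_rfl (by omega)
      simp only [Nat.cast_one, Nat.sub_self] at hinner
      rw [hinner]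
      have hc : (i : Int) + 1 = ((i + 1 : Nat) : Int) := by push_cast; ring
      rw [hc]
      have := ih (i + 1) (by omega) (by omega) (by omega)
      simpa using this
  exact fun i hi1 hin => H (n + 1 - i) i hi1 hin rfl

lemma pvA_eq (matriz V) :
    buscarOptimos matriz V =
      (List.range (matriz.length + 1)).map (fun i =>
        (List.range ((PySem.List.pyGetD matriz 0 []).length + 1)).map
          (fun j => pvF matriz V i j)) := by
  have h0 := outer_fold matriz V matriz.length (PySem.List.pyGetD matriz 0 []).length
    1 le_rfl (by omega)
  rw [show pvT matriz V matriz.length (PySem.List.pyGetD matriz 0 []).length (1 - 1)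
      ((PySem.List.pyGetD matriz 0 []).length) =
      List.replicate (matriz.length + 1)
        (List.replicate ((PySem.List.pyGetD matriz 0 []).length + 1) (0 : Int)) by
    rw [show (1 : Nat) - 1 = 0 by norm_num, pvT_zero_m]] at h0
  rw [pvT_final] at h0
  simp only [buscarOptimos, List.length_replicate]
  simp only [Nat.cast_one] at h0
  rw [show ((matriz.length + 1 : Nat) : Int) = ((matriz.length : Nat) : Int) + 1 by
    push_cast; ring]
  rw [h0]
  refine List.map_congr_left (fun a _ => ?_)
  exact pvRow_full matriz V (PySem.List.pyGetD matriz 0 []).length a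

-- ===== VERDICT (by name: the statement is the Claim_ definition above) =====
theorem buscarOptimos_spec : Claim_equal_buscarOptimos := by
  intro matriz V _hD _hP
  unfold Spec_buscarOptimos
  rw [pvA_eq, pvAlt_eq]
  have h0 : PySem.List.pyGetD matriz 0 [] = matriz.headD [] := by
    rw [PySem.List.pyGetD_zero]; cases matriz <;> simp
  rw [h0]
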